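-- pv_equiv track=rewrite | github.com/davtechBenin/new | lib/Pyweb/wid.py | format_val
-- ===== SOURCE A (Python) =====
-- def format_val(val):
-- 	if type(val)!= str:
-- 		val = str(val)
-- 	lenf = len(val)
-- 	ind = 3
-- 	fr = []
-- 	part = ['']*3
-- 	for i in range(lenf-1,-1,-1):
-- 		ind -= 1
-- 		part.insert(ind,val[i])
-- 		if ind == 0:
-- 			fr.append(''.join(part))
-- 			part = ['']*3
-- 			ind = 3
-- 	P = get_prt(part)
-- 	if P:
-- 		fr.append(P)
--
-- 	fr.reverse()
-- 	return " ".join(fr)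
--
-- def get_prt(part):
-- 	P = str()
-- 	for i in part:
-- 		if i:
-- 			P += i
-- 	return P
-- ===== SOURCE B (Python) =====
-- def format_val(val):
--     if type(val) != str:
--         val = str(val)
--     groups = []
--     i = len(val)
--     while i > 0:
--         groups.append(val[max(0, i - 3):i])
--         i -= 3
--     groups.reverse()
--     return " ".join(groups)
-- ===== Notes on version B (the rewrite author's own statement) =====
-- stated objective: simpler
-- what changed: B slices 3-char chunks off the right end of the string with a while loop over an index, instead of A's per-character reverse scan that inserts single characters into a padded 3-slot buffer with a countdown counter and a get_prt helper to flush the leftover.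
import Mathlib
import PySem

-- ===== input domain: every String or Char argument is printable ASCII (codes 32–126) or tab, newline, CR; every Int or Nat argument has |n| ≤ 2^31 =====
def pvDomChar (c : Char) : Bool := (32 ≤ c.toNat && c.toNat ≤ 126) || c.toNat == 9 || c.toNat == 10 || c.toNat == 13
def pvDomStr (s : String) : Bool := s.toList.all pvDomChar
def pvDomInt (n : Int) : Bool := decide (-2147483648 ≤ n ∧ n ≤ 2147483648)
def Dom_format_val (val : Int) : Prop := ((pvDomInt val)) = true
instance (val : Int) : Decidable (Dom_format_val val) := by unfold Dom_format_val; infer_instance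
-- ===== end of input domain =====

-- B groups str(val) into space-separated triples by slicing 3-char chunks off the right end with an index loop,
-- instead of A's per-character reverse scan inserting into a padded 3-slot buffer (objective: simpler).

-- ===== PORT A =====
-- helper get_prt: concatenates the non-empty entries of the buffer
def get_prt (part : List (List Char)) : List Char :=
  part.foldl (fun P i => if i ≠ [] then P ++ i else P) []

-- one iteration of A's for-loop body, applied to the character at the current index
def stepA (st : Int × List (List Char) × List (List Char)) (c : Char) :
    Int × List (List Char) × List (List Char) :=
  let ind := st.1 - 1
  let part := PySem.List.insert st.2.1 ind [c]
  if ind = 0 then (3, List.replicate 3 [], st.2.2 ++ [PySem.Chars.join [] part])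
  else (ind, part, st.2.2)

def format_val (val : Int) : String :=
  let s := PySem.Int.toChars val       -- val = str(val)
  let lenf : Int := s.length
  let st := (PySem.List.pyRange (lenf - 1) (-1) (-1)).foldl
      (fun st i => stepA st (PySem.List.pyGetD s i ' '))   -- val[i]; i always in range
      (3, List.replicate 3 ([] : List Char), ([] : List (List Char)))
  let P := get_prt st.2.1
  let fr := if P ≠ [] then st.2.2 ++ [P] else st.2.2
  String.ofList (PySem.Chars.join [' '] fr.reverse)

-- ===== PORT B =====
-- the while loop: while i > 0: groups.append(val[max(0,i-3):i]); i -= 3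
def fvLoop (s : List Char) (i : Nat) (g : List (List Char)) : List (List Char) :=
  if i = 0 then g
  else fvLoop s (i - 3) (g ++ [PySem.List.slice s (some (max 0 ((i : Int) - 3))) (some (i : Int))])
termination_by i
decreasing_by omega

def format_val_alt (val : Int) : String :=
  let s := PySem.Int.toChars val       -- val = str(val)
  String.ofList (PySem.Chars.join [' '] ((fvLoop s s.length []).reverse))

-- ===== PRECONDITION & SPEC =====
def Spec_format_val (val : Int) (out : String) : Prop := out = format_val_alt val
instance (val : Int) (out : String) : Decidable (Spec_format_val val out) := by unfold Spec_format_val; infer_instance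

-- ===== CLAIM (what is proved, stated in full; the proofs are below) =====
def Claim_equal_format_val : Prop := ∀ (val : Int), Dom_format_val val → Spec_format_val val (format_val val)

-- ===== LEMMAS AND PROOFS =====

-- reference chunking: triples taken from the front of the REVERSED string, each restored to source order
def chunksRev : List Char → List (List Char)
  | [] => []
  | [c1] => [[c1]]
  | [c1, c2] => [[c2, c1]]
  | c1 :: c2 :: c3 :: r => [c3, c2, c1] :: chunksRev r

-- three iterations of A's loop body from a fresh buffer flush one complete group
lemma step3 (fr : List (List Char)) (c1 c2 c3 : Char) :
    stepA (stepA (stepA (3, List.replicate 3 ([]:List Char), fr) c1) c2) c3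
    = (3, List.replicate 3 ([]:List Char), fr ++ [[c3,c2,c1]]) := by
  simp [stepA, PySem.List.insert, PySem.List.sliceIndices, PySem.Chars.join, List.intercalate]

-- A's loop followed by the get_prt leftover flush produces fr ++ chunksRev r
lemma foldA_chunks (r : List Char) : ∀ fr : List (List Char),
    (let st := r.foldl stepA (3, List.replicate 3 ([] : List Char), fr)
     let P := get_prt st.2.1
     if P ≠ [] then st.2.2 ++ [P] else st.2.2) = fr ++ chunksRev r := by
  induction r using chunksRev.induct with
  | case1 => intro fr; simp [get_prt, chunksRev]
  | case2 c1 =>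
    intro fr
    simp [stepA, get_prt, chunksRev, PySem.List.insert, PySem.List.sliceIndices]
  | case3 c1 c2 =>
    intro fr
    simp [stepA, get_prt, chunksRev, PySem.List.insert, PySem.List.sliceIndices]
  | case4 c1 c2 c3 r ih =>
    intro fr
    have h3 : (c1::c2::c3::r).foldl stepA (3, List.replicate 3 ([]:List Char), fr)
        = r.foldl stepA (3, List.replicate 3 ([]:List Char), fr ++ [[c3,c2,c1]]) := by
      simp only [List.foldl_cons, step3 fr c1 c2 c3]
    simp only [h3]
    rw [ih (fr ++ [[c3,c2,c1]])]
    simp [chunksRev]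

-- A's index loop over range(len-1, -1, -1) is the fold of stepA over the reversed characters
lemma foldA_rev (s : List Char) :
    ∀ init, (PySem.List.pyRange ((s.length : Int) - 1) (-1) (-1)).foldl
        (fun st i => stepA st (PySem.List.pyGetD s i ' ')) init
      = s.reverse.foldl stepA init := by
  induction s using List.reverseRecOn with
  | nil => intro init; simp [PySem.List.pyRange_neg_one_eq_nil]
  | append_singleton t c ih =>
    intro init
    have hlen : (((t ++ [c]).length : Int)) - 1 = (t.length : Int) := by
      simp
    rw [hlen, PySem.List.pyRange_neg_one_cons (by omega)]
    have hget : PySem.List.pyGetD (t ++ [c]) ((t.length : Int)) ' ' = c := by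
      rw [PySem.List.pyGetD_natCast]
      simp
    rw [List.foldl_cons, hget]
    have hcong : (PySem.List.pyRange ((t.length : Int) - 1) (-1) (-1)).foldl
        (fun st i => stepA st (PySem.List.pyGetD (t ++ [c]) i ' ')) (stepA init c)
      = (PySem.List.pyRange ((t.length : Int) - 1) (-1) (-1)).foldl
        (fun st i => stepA st (PySem.List.pyGetD t i ' ')) (stepA init c) := by
      apply PySem.List.foldl_congr_mem
      intro acc i hi
      rw [PySem.List.mem_pyRange_neg_one] at hi
      have h0 : 0 ≤ i := by omega
      obtain ⟨k, rfl⟩ := Int.eq_ofNat_of_zero_le h0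
      rw [PySem.List.pyGetD_natCast, PySem.List.pyGetD_natCast]
      rw [List.getD_append]
      omega
    rw [hcong, ih]
    simp

lemma chunksRev_append3 (chunk r : List Char) (h : chunk.length = 3) :
    chunksRev (chunk.reverse ++ r) = chunk :: chunksRev r := by
  match chunk, h with
  | [a,b,c], _ => simp [chunksRev]

lemma chunksRev_short (t : List Char) (h : t.length = 1 ∨ t.length = 2) :
    chunksRev t.reverse = [t] := by
  match t, h with
  | [a], _ => simp [chunksRev]
  | [a,b], _ => simp [chunksRev]

-- B's while loop produces the chunking of the processed prefix, appended to the accumulator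
lemma fvLoop_eq (s : List Char) : ∀ i : Nat, i ≤ s.length → ∀ g,
    fvLoop s i g = g ++ chunksRev ((s.take i).reverse) := by
  intro i
  induction i using Nat.strong_induction_on with
  | _ i ih =>
    intro hi g
    rcases Nat.eq_zero_or_pos i with h0 | hpos
    · subst h0; simp [fvLoop, chunksRev]
    rw [fvLoop]
    simp only [Nat.pos_iff_ne_zero.mp hpos, if_false]
    by_cases h3 : 3 ≤ i
    · -- full chunk
      have hmax : max 0 ((i : Int) - 3) = ((i - 3 : Nat) : Int) := by omega
      rw [hmax, PySem.List.slice_natCast]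
      have hlen3 : ((s.drop (i-3)).take (i - (i-3))).length = 3 := by
        simp [List.length_take, List.length_drop]; omega
      rw [ih (i-3) (by omega) (Nat.le_trans (Nat.sub_le i 3) hi)]
      have htake : s.take i = s.take (i-3) ++ (s.drop (i-3)).take (i - (i-3)) := by
        conv_lhs => rw [show i = (i-3) + (i - (i-3)) by omega]
        rw [List.take_add]
      rw [htake, List.reverse_append, chunksRev_append3 _ _ hlen3]
      simp
    · -- short chunk: i = 1 or 2
      have hmax : max 0 ((i : Int) - 3) = ((0:Nat) : Int) := by omega
      rw [hmax, PySem.List.slice_natCast]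
      simp only [List.drop_zero, Nat.sub_zero]
      rw [ih (i-3) (by omega) (Nat.le_trans (Nat.sub_le i 3) hi)]
      have : i - 3 = 0 := by omega
      rw [this]
      simp [chunksRev, chunksRev_short (s.take i) (by simp [List.length_take]; omega)]

-- ===== VERDICT (by name: the statement is the Claim_ definition above) =====
theorem format_val_spec : Claim_equal_format_val := by
  intro val _
  unfold Spec_format_val
  simp only [format_val, format_val_alt]
  rw [foldA_rev, foldA_chunks, fvLoop_eq _ _ (le_refl _), List.take_length]
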